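-- pv_equiv track=rewrite | github.com/I1am1your1father1/Graduation-Project | coloring_comparison/tabu.py | initialize_conflict_state
-- ===== SOURCE A (Python) =====
-- def initialize_conflict_state(adj, colors):
--     """
--     初始化：
--     - same_color_deg[v]: 与 v 同色的邻居个数
--     - total_conflict_edges: 冲突边总数
--     - conflict_vertices: 当前有冲突的点集合
--     """
--     n = len(adj)
--     same_color_deg = [0] * n
--     total_conflict_edges = 0
--
--     for u in range(n):
--         for v in adj[u]:
--             if u < v and colors[u] == colors[v]:
--                 same_color_deg[u] += 1
--                 same_color_deg[v] += 1
--                 total_conflict_edges += 1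
--
--     conflict_vertices = set(u for u in range(n) if same_color_deg[u] > 0)
--     return same_color_deg, total_conflict_edges, conflict_vertices
-- ===== SOURCE B (Python) =====
-- def initialize_conflict_state(adj, colors):
--     n = len(adj)
--     # transpose: rev[v] lists every u < v whose adjacency mentions v (with multiplicity)
--     rev = {}
--     for u in range(n):
--         for v in adj[u]:
--             if u < v:
--                 rev.setdefault(v, []).append(u)
--     # per-vertex local computation: degree = outgoing + incoming conflict incidences
--     same_color_deg = []
--     total_conflict_edges = 0
--     for x in range(n):
--         out = sum(1 for v in adj[x] if x < v and colors[x] == colors[v])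
--         inc = sum(1 for u in rev.get(x, []) if colors[u] == colors[x])
--         same_color_deg.append(out + inc)
--         total_conflict_edges += out
--     conflict_vertices = set(x for x in range(n) if same_color_deg[x] > 0)
--     return same_color_deg, total_conflict_edges, conflict_vertices
-- ===== Notes on version B (the rewrite author's own statement) =====
-- stated objective: alternative
-- what changed: A makes one pass double-incrementing a shared mutable degree array; B first builds the graph's transpose (a reverse-adjacency index keyed by target vertex), then computes each vertex's degree locally as outgoing conflicts from its own list plus incoming conflicts read off the transpose, summing the outgoing counts for the edge total.
import Mathlib
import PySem

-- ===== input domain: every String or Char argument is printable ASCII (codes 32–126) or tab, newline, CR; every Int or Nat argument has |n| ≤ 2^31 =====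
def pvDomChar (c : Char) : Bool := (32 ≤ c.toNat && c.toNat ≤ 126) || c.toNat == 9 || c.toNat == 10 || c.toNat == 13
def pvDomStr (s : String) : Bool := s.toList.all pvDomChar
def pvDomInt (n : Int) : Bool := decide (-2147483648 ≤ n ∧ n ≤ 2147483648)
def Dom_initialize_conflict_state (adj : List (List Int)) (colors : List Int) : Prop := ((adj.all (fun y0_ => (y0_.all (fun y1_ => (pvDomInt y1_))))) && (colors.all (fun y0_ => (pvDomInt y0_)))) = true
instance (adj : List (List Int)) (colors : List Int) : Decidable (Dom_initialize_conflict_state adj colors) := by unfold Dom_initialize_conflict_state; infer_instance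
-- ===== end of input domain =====

-- B replaces A's single pass over a shared mutable degree array by: build the graph's transpose
-- (reverse-adjacency index) once, then compute each vertex's degree locally (outgoing + incoming
-- conflict incidences) and the edge total as the sum of the outgoing counts; same cost, different algorithm.
-- ===== PORT A =====
-- loop body of A's inner 'for v in adj[u]'
def icsBody (colors : List Int) (u : Int) (st : List Int × Int) (v : Int) : List Int × Int :=
  if u < v ∧ PySem.List.pyGetD colors u 0 = PySem.List.pyGetD colors v 0 then
    (let d1 := PySem.List.pySetD st.1 u (PySem.List.pyGetD st.1 u 0 + 1)
     PySem.List.pySetD d1 v (PySem.List.pyGetD d1 v 0 + 1), st.2 + 1)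
  else st

def initialize_conflict_state (adj : List (List Int)) (colors : List Int) : List Int × Int × List Int :=
  let n : Int := (adj.length : Int)
  let st := (PySem.List.pyRange 0 n 1).foldl
      (fun st u => (PySem.List.pyGetD adj u []).foldl (icsBody colors u) st)
      (List.replicate adj.length (0 : Int), (0 : Int))
  let conflict_vertices := PySem.Set.ofList
      ((PySem.List.pyRange 0 n 1).filter (fun u => decide (0 < PySem.List.pyGetD st.1 u 0)))
  (st.1, st.2, conflict_vertices)

-- ===== PORT B =====
-- B's transpose pass restricted to one source vertex u: rev.setdefault(v, []).append(u) for v in adj[u] with u < v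
def icsRevStep (adj : List (List Int)) (d : PySem.Dict Int (List Int)) (u : Int) : PySem.Dict Int (List Int) :=
  (PySem.List.pyGetD adj u []).foldl
    (fun d v => if u < v then PySem.Dict.modify d v [] (fun l => l ++ [u]) else d) d

-- B's per-vertex 'out' count: sum(1 for v in adj[x] if x < v and colors[x] == colors[v])
def icsOutB (adj : List (List Int)) (colors : List Int) (x : Int) : Int :=
  (((PySem.List.pyGetD adj x []).filter
      (fun v => decide (x < v ∧ PySem.List.pyGetD colors x 0 = PySem.List.pyGetD colors v 0))).length : Int)

-- B's per-vertex 'inc' count: sum(1 for u in rev.get(x, []) if colors[u] == colors[x])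
def icsIncB (colors : List Int) (rev : PySem.Dict Int (List Int)) (x : Int) : Int :=
  (((PySem.Dict.getD rev x []).filter
      (fun u => decide (PySem.List.pyGetD colors u 0 = PySem.List.pyGetD colors x 0))).length : Int)

def initialize_conflict_state_alt (adj : List (List Int)) (colors : List Int) : List Int × Int × List Int :=
  let n : Int := (adj.length : Int)
  let rev := (PySem.List.pyRange 0 n 1).foldl (icsRevStep adj) PySem.Dict.empty
  let st := (PySem.List.pyRange 0 n 1).foldl
      (fun (st : List Int × Int) x =>
        (st.1 ++ [icsOutB adj colors x + icsIncB colors rev x], st.2 + icsOutB adj colors x))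
      (([] : List Int), (0 : Int))
  let conflict_vertices := PySem.Set.ofList
      ((PySem.List.pyRange 0 n 1).filter (fun x => decide (0 < PySem.List.pyGetD st.1 x 0)))
  (st.1, st.2, conflict_vertices)

-- ===== PRECONDITION & SPEC =====
-- Pre_ excludes exactly the inputs where Python A raises an IndexError: a vertex u with a
-- neighbour v > u needs colors[u] and colors[v] to exist, and same_color_deg[v] (i.e. v < len(adj))
-- whenever the colors actually match.
def Pre_initialize_conflict_state (adj : List (List Int)) (colors : List Int) : Prop :=
  ∀ u ∈ List.range adj.length, ∀ v ∈ adj.getD u [], (u : Int) < v →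
    u < colors.length ∧ v.toNat < colors.length ∧
    (colors.getD u 0 = colors.getD v.toNat 0 → v.toNat < adj.length)
instance (adj : List (List Int)) (colors : List Int) : Decidable (Pre_initialize_conflict_state adj colors) := by
  unfold Pre_initialize_conflict_state; infer_instance

def pvWitness_initialize_conflict_state : List (List Int) × List Int := ([[1], [0]], [0, 0])

def Spec_initialize_conflict_state (adj : List (List Int)) (colors : List Int) (out : List Int × Int × List Int) : Prop := out = initialize_conflict_state_alt adj colors
instance (adj : List (List Int)) (colors : List Int) (out : List Int × Int × List Int) : Decidable (Spec_initialize_conflict_state adj colors out) := by unfold Spec_initialize_conflict_state; infer_instance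

-- ===== CLAIM (what is proved, stated in full; the proofs are below) =====
def Claim_equal_initialize_conflict_state : Prop := ∀ (adj : List (List Int)) (colors : List Int), Dom_initialize_conflict_state adj colors → Pre_initialize_conflict_state adj colors → Spec_initialize_conflict_state adj colors (initialize_conflict_state adj colors)

-- ===== LEMMAS AND PROOFS =====

-- A's conflict pairs emitted while scanning vertex u (proof-side abstraction)
def icsConf (adj : List (List Int)) (colors : List Int) (u : Int) : List (Int × Int) :=
  (PySem.List.pyGetD adj u []).filterMap (fun v =>
    if u < v ∧ PySem.List.pyGetD colors u 0 = PySem.List.pyGetD colors v 0 then some (u, v) else none)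

-- B's transpose pairs (target, source) emitted while scanning vertex u (proof-side abstraction)
def icsRevf (adj : List (List Int)) (u : Int) : List (Int × Int) :=
  (PySem.List.pyGetD adj u []).filterMap (fun v => if u < v then some (v, u) else none)

-- the unconditional double increment A performs for a conflict edge
def icsBump (d : List Int) (p : Int × Int) : List Int :=
  PySem.List.pySetD (PySem.List.pySetD d p.1 (PySem.List.pyGetD d p.1 0 + 1)) p.2
    (PySem.List.pyGetD (PySem.List.pySetD d p.1 (PySem.List.pyGetD d p.1 0 + 1)) p.2 0 + 1)

theorem ics_foldl_flatMap {α β γ : Type} (l : List β) (f : β → List γ) (g : α → γ → α) (i : α) :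
    (l.flatMap f).foldl g i = l.foldl (fun a x => (f x).foldl g a) i := by
  induction l generalizing i with
  | nil => rfl
  | cons x xs ih => simp [List.flatMap_cons, List.foldl_append, ih]

theorem ics_inner_eq (adj : List (List Int)) (colors : List Int) (u : Int) (st : List Int × Int) :
    (PySem.List.pyGetD adj u []).foldl (icsBody colors u) st
      = (icsConf adj colors u).foldl (fun st p => (icsBump st.1 p, st.2 + 1)) st := by
  unfold icsConf
  generalize PySem.List.pyGetD adj u [] = l
  induction l generalizing st with
  | nil => rfl
  | cons v vs ih =>
    by_cases h : u < v ∧ PySem.List.pyGetD colors u 0 = PySem.List.pyGetD colors v 0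
    · simp only [List.foldl_cons, List.filterMap_cons, if_pos h, icsBody, icsBump, ih]
    · simp only [List.foldl_cons, List.filterMap_cons, if_neg h, icsBody, ih]

theorem ics_foldl_pair (E : List (Int × Int)) (d : List Int) (t : Int) :
    E.foldl (fun st p => (icsBump st.1 p, st.2 + 1)) (d, t) = (E.foldl icsBump d, t + E.length) := by
  induction E generalizing d t with
  | nil => simp
  | cons p E ih => simp [ih]; omega

theorem ics_getD_set (l : List Int) (i x : Nat) (v : Int) (_hi : i < l.length) (hx : x < l.length) :
    (l.set i v).getD x 0 = if i = x then v else l.getD x 0 := by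
  rw [List.getD_eq_getElem _ _ (by simpa using hx), List.getElem_set]
  split_ifs with h
  · rfl
  · rw [List.getD_eq_getElem _ _ hx]

theorem ics_bump_getD (E : List (Int × Int)) (d : List Int)
    (hE : ∀ p ∈ E, 0 ≤ p.1 ∧ p.1.toNat < d.length ∧ 0 ≤ p.2 ∧ p.2.toNat < d.length) :
    (E.foldl icsBump d).length = d.length ∧
    ∀ x : Nat, x < d.length →
      (E.foldl icsBump d).getD x 0
        = d.getD x 0 + ((E.flatMap fun p => [p.1, p.2]).count (x : Int) : Int) := by
  induction E generalizing d with
  | nil => simp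
  | cons p E ih =>
    obtain ⟨h1, h1l, h2, h2l⟩ := hE p (List.mem_cons_self ..)
    have hlen : (icsBump d p).length = d.length := by
      simp [icsBump, PySem.List.length_pySetD]
    have hE' : ∀ q ∈ E, 0 ≤ q.1 ∧ q.1.toNat < (icsBump d p).length ∧ 0 ≤ q.2 ∧ q.2.toNat < (icsBump d p).length := by
      intro q hq; rw [hlen]; exact hE q (List.mem_cons_of_mem _ hq)
    obtain ⟨ihl, ihv⟩ := ih (icsBump d p) hE'
    refine ⟨by rw [List.foldl_cons, ihl, hlen], ?_⟩
    intro x hx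
    rw [List.foldl_cons, ihv x (by omega)]
    have hbump : icsBump d p
        = (d.set p.1.toNat (d.getD p.1.toNat 0 + 1)).set p.2.toNat
            ((d.set p.1.toNat (d.getD p.1.toNat 0 + 1)).getD p.2.toNat 0 + 1) := by
      simp only [icsBump, PySem.List.pySetD_of_nonneg _ _ h1, PySem.List.pyGetD_of_nonneg _ _ h1,
        PySem.List.pySetD_of_nonneg _ _ h2, PySem.List.pyGetD_of_nonneg _ _ h2]
    have hcount : ((((p :: E).flatMap fun q => [q.1, q.2]).count (x : Int) : Nat) : Int)
        = ((if p.1 = (x : Int) then (1 : Int) else 0) + (if p.2 = (x : Int) then (1 : Int) else 0))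
          + (((E.flatMap fun q => [q.1, q.2]).count (x : Int) : Nat) : Int) := by
      simp only [List.flatMap_cons, List.count_append, List.count_cons, List.count_nil, beq_iff_eq]
      push_cast
      split_ifs <;> omega
    rw [hbump, hcount]
    rw [ics_getD_set _ _ _ _ (by simpa using h2l) (by simpa using hx)]
    have hg2 : (d.set p.1.toNat (d.getD p.1.toNat 0 + 1)).getD p.2.toNat 0
        = if p.1.toNat = p.2.toNat then d.getD p.1.toNat 0 + 1 else d.getD p.2.toNat 0 :=
      ics_getD_set _ _ _ _ h1l h2l
    rw [ics_getD_set _ _ _ _ h1l hx, hg2]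
    by_cases hA : p.2.toNat = x
    · have hp2 : p.2 = (x : Int) := by omega
      by_cases hC : p.1.toNat = p.2.toNat
      · have hp1 : p.1 = (x : Int) := by omega
        have e1 : d.getD p.1.toNat 0 = d.getD x 0 := by rw [hC, hA]
        rw [if_pos hA, if_pos hC, if_pos hp1, if_pos hp2, e1]; omega
      · have hp1 : ¬ p.1 = (x : Int) := by omega
        have e2 : d.getD p.2.toNat 0 = d.getD x 0 := by rw [hA]
        rw [if_pos hA, if_neg hC, if_neg hp1, if_pos hp2, e2]; omega
    · have hp2 : ¬ p.2 = (x : Int) := by omega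
      by_cases hB : p.1.toNat = x
      · have hp1 : p.1 = (x : Int) := by omega
        have e1 : d.getD p.1.toNat 0 = d.getD x 0 := by rw [hB]
        rw [if_neg hA, if_pos hB, if_pos hp1, if_neg hp2, e1]; omega
      · have hp1 : ¬ p.1 = (x : Int) := by omega
        rw [if_neg hA, if_neg hB, if_neg hp1, if_neg hp2]; omega

-- ---- B-side characterisation ----

-- B's inner transpose loop is a fold over the (target, source) pairs of u
theorem ics_rev_inner (adj : List (List Int)) (u : Int) (d : PySem.Dict Int (List Int)) :
    icsRevStep adj d u
      = (icsRevf adj u).foldl (fun d p => PySem.Dict.modify d p.1 [] (fun l => l ++ [p.2])) d := by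
  unfold icsRevStep icsRevf
  generalize PySem.List.pyGetD adj u [] = l
  induction l generalizing d with
  | nil => rfl
  | cons v vs ih =>
    by_cases h : u < v
    · simp only [List.foldl_cons, List.filterMap_cons, if_pos h, ih]
    · simp only [List.foldl_cons, List.filterMap_cons, if_neg h, ih]

-- generic: filterMap-with-guard has the length of the corresponding filter
theorem ics_len_filterMap {α β : Type} (l : List α) (P : α → Prop) [DecidablePred P] (f : α → β) :
    (l.filterMap (fun v => if P v then some (f v) else none)).length
      = (l.filter (fun v => decide (P v))).length := by
  induction l with
  | nil => rfl
  | cons v vs ih =>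
    by_cases h : P v <;>
      simp [h, ih]

-- per-vertex agreement: incoming conflict incidences read off u's transpose pairs
-- equal the second-component count of u's conflict pairs
theorem ics_per_u (colors : List Int) (u x : Int) (l : List Int) :
    ((((l.filterMap (fun v => if u < v then some (v, u) else none)).filter
          (fun p => p.1 == x)).map Prod.snd).filter
        (fun w => decide (PySem.List.pyGetD colors w 0 = PySem.List.pyGetD colors x 0))).length
      = (l.filterMap (fun v =>
          if u < v ∧ PySem.List.pyGetD colors u 0 = PySem.List.pyGetD colors v 0 then some (u, v) else none)).countP
          (fun p => p.2 == x) := by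
  induction l with
  | nil => rfl
  | cons v vs ih =>
    by_cases h1 : u < v
    · by_cases h4 : PySem.List.pyGetD colors u 0 = PySem.List.pyGetD colors v 0
      · by_cases h2 : v = x
        · subst h2
          simp [h1, h4, ih]
        · simp [h1, h4, h2, ih]
      · by_cases h2 : v = x
        · subst h2
          simp [h1, h4, ih]
        · simp [h1, h4, h2, ih]
    · simp [h1, ih]

theorem ics_lenP (adj : List (List Int)) (colors : List Int) (x : Int) (L : List Int) :
    ((((L.flatMap (icsRevf adj)).filter (fun p => p.1 == x)).map Prod.snd).filter
        (fun w => decide (PySem.List.pyGetD colors w 0 = PySem.List.pyGetD colors x 0))).length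
      = (L.flatMap (icsConf adj colors)).countP (fun p => p.2 == x) := by
  induction L with
  | nil => rfl
  | cons u L ih =>
    simp only [List.flatMap_cons, List.filter_append, List.map_append, List.length_append,
      List.countP_append, ih, icsRevf, icsConf]
    rw [ics_per_u]

theorem ics_count_pair (E : List (Int × Int)) (x : Int) :
    (E.flatMap fun p => [p.1, p.2]).count x
      = E.countP (fun p => p.1 == x) + E.countP (fun p => p.2 == x) := by
  induction E with
  | nil => rfl
  | cons p E ih =>
    simp only [List.flatMap_cons, List.count_append, List.countP_cons, List.count_cons,
      List.count_nil, ih]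
    by_cases h1 : p.1 == x <;> by_cases h2 : p.2 == x <;> simp [h1, h2] <;> omega

theorem ics_mem_conf_fst (adj : List (List Int)) (colors : List Int) (u : Int) (p : Int × Int)
    (hp : p ∈ icsConf adj colors u) : p.1 = u := by
  unfold icsConf at hp
  rw [List.mem_filterMap] at hp
  obtain ⟨v, _, hsome⟩ := hp
  by_cases h : u < v ∧ PySem.List.pyGetD colors u 0 = PySem.List.pyGetD colors v 0
  · rw [if_pos h] at hsome; cases hsome; rfl
  · rw [if_neg h] at hsome; cases hsome

theorem ics_cP1_zero (adj : List (List Int)) (colors : List Int) (x : Int) (L : List Int)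
    (hx : x ∉ L) : (L.flatMap (icsConf adj colors)).countP (fun p => p.1 == x) = 0 := by
  rw [List.countP_eq_zero]
  intro p hp
  rw [List.mem_flatMap] at hp
  obtain ⟨u, hu, hpu⟩ := hp
  have := ics_mem_conf_fst adj colors u p hpu
  simp only [beq_iff_eq]
  intro h; exact hx (by rwa [← this, h] at hu)

theorem ics_cP1 (adj : List (List Int)) (colors : List Int) (x : Int) (L : List Int)
    (hnd : L.Nodup) (hx : x ∈ L) :
    (L.flatMap (icsConf adj colors)).countP (fun p => p.1 == x) = (icsConf adj colors x).length := by
  induction L with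
  | nil => cases hx
  | cons u L ih =>
    rw [List.nodup_cons] at hnd
    rw [List.flatMap_cons, List.countP_append]
    rcases List.mem_cons.mp hx with rfl | hxL
    · rw [ics_cP1_zero adj colors x L hnd.1, Nat.add_zero]
      exact List.countP_eq_length.2 (fun p hp => by simp [ics_mem_conf_fst adj colors x p hp])
    · have hne : u ≠ x := fun h => hnd.1 (h ▸ hxL)
      rw [ih hnd.2 hxL,
        List.countP_eq_zero.2 (fun p hp => by simp [ics_mem_conf_fst adj colors u p hp, hne]),
        Nat.zero_add]

-- the output-list fold of B's second pass
theorem ics_scan (F G : Int → Int) (L : List Int) (acc : List Int × Int) :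
    L.foldl (fun st x => (st.1 ++ [F x], st.2 + G x)) acc
      = (acc.1 ++ L.map F, acc.2 + (L.map G).sum) := by
  induction L generalizing acc with
  | nil => simp
  | cons x L ih => simp [ih]; omega

theorem ics_range_nodup (n : Nat) : (PySem.List.pyRange 0 (n : Int) 1).Nodup := by
  rw [PySem.List.pyRange_zero_natCast]
  exact (List.nodup_range).map (fun a b => by omega)

theorem ics_main (adj : List (List Int)) (colors : List Int)
    (hpre : Pre_initialize_conflict_state adj colors) :
    initialize_conflict_state adj colors = initialize_conflict_state_alt adj colors := by
  simp only [initialize_conflict_state, initialize_conflict_state_alt]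
  set E := (PySem.List.pyRange 0 ((adj.length : Int)) 1).flatMap (icsConf adj colors) with hEdef
  set eps := E.flatMap (fun p => [p.1, p.2]) with hepsdef
  -- A's fold in terms of E
  have hstep : ∀ st : List Int × Int,
      (PySem.List.pyRange 0 ((adj.length : Int)) 1).foldl
          (fun st u => (PySem.List.pyGetD adj u []).foldl (icsBody colors u) st) st
        = E.foldl (fun st p => (icsBump st.1 p, st.2 + 1)) st := by
    intro st
    rw [hEdef, ics_foldl_flatMap]
    exact PySem.List.foldl_congr_mem _ _ _ _ (fun acc u _ => ics_inner_eq adj colors u acc)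
  rw [hstep, ics_foldl_pair]
  -- bounds for conflict pairs
  have hEp : ∀ p ∈ E, 0 ≤ p.1 ∧ p.1.toNat < adj.length ∧ 0 ≤ p.2 ∧ p.2.toNat < adj.length := by
    intro p hp
    rw [hEdef, List.mem_flatMap] at hp
    obtain ⟨u, huR, hpC⟩ := hp
    obtain ⟨hu0, hun⟩ := PySem.List.mem_pyRange_one.mp huR
    unfold icsConf at hpC
    rw [List.mem_filterMap] at hpC
    obtain ⟨v, hv, hsome⟩ := hpC
    by_cases hc : u < v ∧ PySem.List.pyGetD colors u 0 = PySem.List.pyGetD colors v 0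
    · rw [if_pos hc] at hsome
      obtain ⟨huv, hcol⟩ := hc
      have hv0 : 0 ≤ v := by omega
      have hadj : PySem.List.pyGetD adj u [] = adj.getD u.toNat [] := PySem.List.pyGetD_of_nonneg adj [] hu0
      have humem : u.toNat ∈ List.range adj.length := by
        rw [List.mem_range]; omega
      have hpre' := hpre u.toNat humem v (by rwa [← hadj]) (by omega)
      obtain ⟨hcu, hcv, himp⟩ := hpre'
      have hvn : v.toNat < adj.length := by
        apply himp
        have e1 : PySem.List.pyGetD colors u 0 = colors.getD u.toNat 0 := PySem.List.pyGetD_of_nonneg colors 0 hu0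
        have e2 : PySem.List.pyGetD colors v 0 = colors.getD v.toNat 0 := PySem.List.pyGetD_of_nonneg colors 0 hv0
        rw [← e1, ← e2]; exact hcol
      obtain rfl : p = (u, v) := (Option.some.inj hsome).symm
      dsimp only
      exact ⟨hu0, by omega, hv0, by omega⟩
    · rw [if_neg hc] at hsome; exact absurd hsome (by simp)
  have hrep : ∀ q ∈ E, 0 ≤ q.1 ∧ q.1.toNat < (List.replicate adj.length (0 : Int)).length ∧ 0 ≤ q.2 ∧ q.2.toNat < (List.replicate adj.length (0 : Int)).length := by
    simpa using hEp
  obtain ⟨hDlen, hDval⟩ := ics_bump_getD E (List.replicate adj.length (0 : Int)) hrep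
  set D := E.foldl icsBump (List.replicate adj.length (0 : Int)) with hDdef
  have hDlen' : D.length = adj.length := by simpa using hDlen
  have hDval' : ∀ x : Nat, x < adj.length → D.getD x 0 = (eps.count (x : Int) : Int) := by
    intro x hx
    rw [hDval x (by simpa using hx)]
    rw [hepsdef]
    simp
  -- the transpose dict B builds
  set rev := (PySem.List.pyRange 0 ((adj.length : Int)) 1).foldl (icsRevStep adj) PySem.Dict.empty with hrevdef
  have hrev : ∀ x : Int, PySem.Dict.getD rev x []
      = (((PySem.List.pyRange 0 ((adj.length : Int)) 1).flatMap (icsRevf adj)).filter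
          (fun p => p.1 == x)).map Prod.snd := by
    intro x
    have h1 : rev = ((PySem.List.pyRange 0 ((adj.length : Int)) 1).flatMap (icsRevf adj)).foldl
        (fun d p => PySem.Dict.modify d p.1 [] (fun l => l ++ [p.2])) PySem.Dict.empty := by
      rw [hrevdef, ics_foldl_flatMap]
      exact PySem.List.foldl_congr_mem _ _ _ _ (fun d u _ => ics_rev_inner adj u d)
    rw [h1, PySem.Dict.getD_foldl_modify_append, PySem.Dict.getD_empty, List.nil_append]
  -- pointwise value of B's per-vertex computation
  have hpt : ∀ x ∈ PySem.List.pyRange 0 ((adj.length : Int)) 1,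
      icsOutB adj colors x + icsIncB colors rev x = (eps.count x : Int) := by
    intro x hxR
    have hout : icsOutB adj colors x = ((icsConf adj colors x).length : Int) := by
      rw [icsOutB, icsConf, ics_len_filterMap]
    have hinc : icsIncB colors rev x = (E.countP (fun p => p.2 == x) : Int) := by
      rw [icsIncB, hrev, hEdef]
      exact_mod_cast ics_lenP adj colors x (PySem.List.pyRange 0 ((adj.length : Int)) 1)
    have hcnt : eps.count x = E.countP (fun p => p.1 == x) + E.countP (fun p => p.2 == x) := by
      rw [hepsdef]; exact ics_count_pair E x
    have h1 : E.countP (fun p => p.1 == x) = (icsConf adj colors x).length := by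
      rw [hEdef]
      exact ics_cP1 adj colors x _ (ics_range_nodup adj.length) hxR
    rw [hout, hinc, hcnt, h1]
    push_cast
    ring
  -- B's second pass
  rw [ics_scan]
  have hsum : ((PySem.List.pyRange 0 ((adj.length : Int)) 1).map (icsOutB adj colors)).sum
      = (E.length : Int) := by
    have hlen : E.length = ((PySem.List.pyRange 0 ((adj.length : Int)) 1).map
        (fun u => (icsConf adj colors u).length)).sum := by
      rw [hEdef, List.length_flatMap]
    have hmc : (PySem.List.pyRange 0 ((adj.length : Int)) 1).map (icsOutB adj colors)
        = (PySem.List.pyRange 0 ((adj.length : Int)) 1).map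
            (fun u => ((icsConf adj colors u).length : Int)) := by
      apply List.map_congr_left
      intro u _
      rw [icsOutB, icsConf, ics_len_filterMap]
    rw [hmc, hlen]
    push_cast
    rw [List.map_map]
    rfl
  have hfst : D = (PySem.List.pyRange 0 ((adj.length : Int)) 1).map
      (fun x => icsOutB adj colors x + icsIncB colors rev x) := by
    apply List.ext_getElem
    · rw [hDlen', List.length_map, PySem.List.length_pyRange_one]; omega
    · intro i h1 h2
      have hi : i < adj.length := by rwa [hDlen'] at h1
      rw [List.getElem_map, PySem.List.getElem_pyRange_one]
      have hmem : ((0 : Int) + (i : Int)) ∈ PySem.List.pyRange 0 ((adj.length : Int)) 1 := by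
        rw [PySem.List.mem_pyRange_one]; constructor <;> omega
      rw [hpt ((0 : Int) + (i : Int)) hmem]
      rw [← List.getD_eq_getElem D 0 h1, hDval' i hi]
      norm_num
  have hcv : (PySem.List.pyRange 0 ((adj.length : Int)) 1).filter
        (fun u => decide (0 < PySem.List.pyGetD D u 0))
      = (PySem.List.pyRange 0 ((adj.length : Int)) 1).filter
        (fun x => decide (0 < PySem.List.pyGetD ((PySem.List.pyRange 0 ((adj.length : Int)) 1).map
            (fun x => icsOutB adj colors x + icsIncB colors rev x)) x 0)) := by
    apply List.filter_congr
    intro u _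
    rw [hfst]
  dsimp only
  refine Prod.ext hfst (Prod.ext ?_ ?_)
  · dsimp only; rw [← hsum]
  · dsimp only
    exact congrArg PySem.Set.ofList hcv

-- ===== VERDICT (by name: the statement is the Claim_ definition above) =====
theorem initialize_conflict_state_spec : Claim_equal_initialize_conflict_state := by
  intro adj colors _ hpre
  unfold Spec_initialize_conflict_state
  exact ics_main adj colors hpre
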